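-- pv_equiv track=rewrite | github.com/daniel-reich/ubiquitous-fiesta | 4gDNqQB355FFGFFWN_15.py | available_spots
-- ===== SOURCE A (Python) =====
-- def available_spots(lst, num):
--   if len(lst) < 2:
--     return 0
--   l_wrk = []
--   for i in range(len(lst)-1):
--     l_wrk.append(("even" if lst[i]%2 == 0 else "odd", "even" if lst[i+1]%2 == 0 else "odd"))
--
--   if num%2==0:
--     return len(l_wrk) - l_wrk.count(("odd", "odd"))
--   else:
--     return len(l_wrk) - l_wrk.count(("even", "even"))
-- ===== SOURCE B (Python) =====
-- def available_spots(lst, num):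
--     n = len(lst)
--     if n < 2:
--         return 0
--     bad_parity = 1 if num % 2 == 0 else 0
--     bad = 0
--     i = 0
--     while i < n:
--         p = lst[i] % 2
--         j = i + 1
--         while j < n and lst[j] % 2 == p:
--             j += 1
--         if p == bad_parity:
--             bad += (j - i) - 1
--         i = j
--     return (n - 1) - bad
-- ===== Notes on version B (the rewrite author's own statement) =====
-- stated objective: alternative
-- what changed: B replaces A's build-then-scan of a list of adjacent parity-string pairs with a single walk over maximal runs of equal parity, counting run_len - 1 bad pairs per bad-parity run and returning (len-1) - bad.
import Mathlib
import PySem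

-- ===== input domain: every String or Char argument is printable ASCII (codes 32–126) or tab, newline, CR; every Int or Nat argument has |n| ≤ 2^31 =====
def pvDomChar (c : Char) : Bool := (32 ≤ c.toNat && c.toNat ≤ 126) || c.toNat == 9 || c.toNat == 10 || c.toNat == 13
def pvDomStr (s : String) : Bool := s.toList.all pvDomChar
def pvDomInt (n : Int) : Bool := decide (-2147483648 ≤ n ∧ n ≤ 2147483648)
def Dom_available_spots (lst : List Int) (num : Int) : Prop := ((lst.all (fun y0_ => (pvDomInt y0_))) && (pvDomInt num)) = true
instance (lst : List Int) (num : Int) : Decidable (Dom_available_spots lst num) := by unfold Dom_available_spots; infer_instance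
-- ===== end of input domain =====

-- B counts the bad adjacent pairs by walking maximal runs of equal parity (run_len - 1 per
-- bad-parity run) instead of building and scanning a list of adjacent parity-string pairs;
-- objective: alternative decomposition, same O(n) cost.

-- ===== PORT A =====
def available_spots (lst : List Int) (num : Int) : Int :=
  if PySem.List.len lst < 2 then 0
  else
    -- for i in range(len(lst)-1): l_wrk.append((…, …)); indices i, i+1 are always in range
    let l_wrk : List (String × String) :=
      (PySem.List.pyRange 0 (PySem.List.len lst - 1) 1).foldl
        (fun acc i =>
          acc ++ [((if PySem.Int.mod (PySem.List.pyGetD lst i 0) 2 == 0 then "even" else "odd"),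
                   (if PySem.Int.mod (PySem.List.pyGetD lst (i + 1) 0) 2 == 0 then "even" else "odd"))])
        []
    if PySem.Int.mod num 2 == 0 then
      PySem.List.len l_wrk - (PySem.List.count l_wrk ("odd", "odd") : Int)
    else
      PySem.List.len l_wrk - (PySem.List.count l_wrk ("even", "even") : Int)

-- ===== PORT B =====
-- the outer while loop of Source B: peel one maximal run of equal parity off the front,
-- add run_len - 1 (= the length of the run's tail) if its parity is bad, recurse on the rest
def asRuns (bad : Int) : List Int → Int
  | [] => 0
  | x :: xs =>
    let p := PySem.Int.mod x 2
    (if p == bad then ((xs.takeWhile (fun y => PySem.Int.mod y 2 == p)).length : Int) else 0)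
      + asRuns bad (xs.dropWhile (fun y => PySem.Int.mod y 2 == p))
  termination_by l => l.length
  decreasing_by
    simpa using Nat.lt_succ_of_le (List.length_dropWhile_le _ xs)

def available_spots_alt (lst : List Int) (num : Int) : Int :=
  if lst.length < 2 then 0
  else
    let bad_parity : Int := if PySem.Int.mod num 2 == 0 then 1 else 0
    ((lst.length : Int) - 1) - asRuns bad_parity lst

-- ===== PRECONDITION & SPEC =====
def Spec_available_spots (lst : List Int) (num : Int) (out : Int) : Prop := out = available_spots_alt lst num
instance (lst : List Int) (num : Int) (out : Int) : Decidable (Spec_available_spots lst num out) := by unfold Spec_available_spots; infer_instance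

-- ===== CLAIM (what is proved, stated in full; the proofs are below) =====
def Claim_equal_available_spots : Prop := ∀ (lst : List Int) (num : Int), Dom_available_spots lst num → Spec_available_spots lst num (available_spots lst num)

-- ===== LEMMAS AND PROOFS =====

theorem asRuns_nil (bad : Int) : asRuns bad [] = 0 := by rw [asRuns.eq_def]

theorem asRuns_cons (bad x : Int) (xs : List Int) :
    asRuns bad (x :: xs) =
      (if PySem.Int.mod x 2 == bad then
        ((xs.takeWhile (fun y => PySem.Int.mod y 2 == PySem.Int.mod x 2)).length : Int) else 0)
      + asRuns bad (xs.dropWhile (fun y => PySem.Int.mod y 2 == PySem.Int.mod x 2)) := by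
  rw [asRuns.eq_def]

-- the common characterisation: number of adjacent pairs whose parities are both `bad`
def badPairs (bad : Int) : List Int → Int
  | x :: y :: rest =>
    (if PySem.Int.mod x 2 == bad && PySem.Int.mod y 2 == bad then 1 else 0) + badPairs bad (y :: rest)
  | _ => 0

theorem asRuns_eq_badPairs (bad : Int) (l : List Int) : asRuns bad l = badPairs bad l := by
  induction l with
  | nil => simp [asRuns_nil, badPairs]
  | cons x xs ih =>
    cases xs with
    | nil => simp [asRuns_cons, badPairs, asRuns_nil]
    | cons y ys =>
      by_cases h : PySem.Int.mod y 2 = PySem.Int.mod x 2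
      · rw [asRuns_cons] at ih
        rw [asRuns_cons, badPairs, ← ih]
        simp only [List.takeWhile_cons, List.dropWhile_cons, h, beq_self_eq_true, if_true,
          Bool.and_self, List.length_cons]
        by_cases hb : PySem.Int.mod x 2 = bad <;> simp [hb] <;> split_ifs <;> push_cast <;> ring
      · have hne : (PySem.Int.mod y 2 == PySem.Int.mod x 2) = false := by simpa using h
        have hpair : (PySem.Int.mod x 2 == bad && PySem.Int.mod y 2 == bad) = false := by
          simp only [Bool.and_eq_false_iff, beq_eq_false_iff_ne, ne_eq]
          rcases eq_or_ne (PySem.Int.mod x 2) bad with hb | hb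
          · exact Or.inr (fun hc => h (hc.trans hb.symm))
          · exact Or.inl hb
        rw [asRuns_cons, badPairs]
        simp only [List.takeWhile_cons, List.dropWhile_cons, hne, if_false, Bool.false_eq_true,
          List.length_nil, hpair, ih]
        simp

-- the adjacent parity-string pairs A builds, as a structural recursion
def pairs : List Int → List (String × String)
  | x :: y :: rest =>
    ((if PySem.Int.mod x 2 == 0 then "even" else "odd"),
     (if PySem.Int.mod y 2 == 0 then "even" else "odd")) :: pairs (y :: rest)
  | _ => []

theorem count_pairs_odd (l : List Int) :
    (List.count ("odd", "odd") (pairs l) : Int) = badPairs 1 l := by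
  induction l with
  | nil => simp [pairs, badPairs]
  | cons x xs ih =>
    cases xs with
    | nil => simp [pairs, badPairs]
    | cons y ys =>
      rw [pairs, badPairs, List.count_cons, ← ih]
      rcases PySem.Int.mod_two_eq x with hx | hx <;>
      rcases PySem.Int.mod_two_eq y with hy | hy <;> simp [hx, hy] <;> ring

theorem count_pairs_even (l : List Int) :
    (List.count ("even", "even") (pairs l) : Int) = badPairs 0 l := by
  induction l with
  | nil => simp [pairs, badPairs]
  | cons x xs ih =>
    cases xs with
    | nil => simp [pairs, badPairs]
    | cons y ys =>
      rw [pairs, badPairs, List.count_cons, ← ih]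
      rcases PySem.Int.mod_two_eq x with hx | hx <;>
      rcases PySem.Int.mod_two_eq y with hy | hy <;> simp [hx, hy] <;> ring

theorem map_range_nat (l : List Int) :
    (List.range (l.length - 1)).map
      (fun k => ((if PySem.Int.mod (l.getD k 0) 2 == 0 then "even" else "odd"),
                 (if PySem.Int.mod (l.getD (k + 1) 0) 2 == 0 then "even" else "odd")))
      = pairs l := by
  induction l with
  | nil => simp [pairs]
  | cons x xs ih =>
    cases xs with
    | nil => simp [pairs]
    | cons y ys =>
      have hlen : (x :: y :: ys).length - 1 = (y :: ys).length - 1 + 1 := by simp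
      rw [hlen, List.range_succ_eq_map, List.map_cons, List.map_map, pairs]
      -- head pair is definitional; the tail goal is closed by congr via the induction
      -- hypothesis (the composed function is definitionally ih's function)
      congr 1

theorem map_range_int (l : List Int) :
    List.map
      (fun i => ((if PySem.Int.mod (PySem.List.pyGetD l i 0) 2 == 0 then "even" else "odd"),
                 (if PySem.Int.mod (PySem.List.pyGetD l (i + 1) 0) 2 == 0 then "even" else "odd")))
      (List.map (fun k => ((k : Nat) : Int)) (List.range (l.length - 1)))
      = pairs l := by
  rw [List.map_map, ← map_range_nat]
  apply List.map_congr_left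
  intro k _
  have h1 : ((k : Int) + 1) = ((k + 1 : Nat) : Int) := by push_cast; ring
  simp only [Function.comp_apply]
  rw [h1, PySem.List.pyGetD_natCast, PySem.List.pyGetD_natCast]

theorem length_pairs (l : List Int) : (pairs l).length = l.length - 1 := by
  rw [← map_range_nat]; simp

theorem available_spots_eq (lst : List Int) (num : Int) :
    available_spots lst num = available_spots_alt lst num := by
  rw [available_spots, available_spots_alt]
  simp only [PySem.List.len_eq]
  by_cases hl : (lst.length : Int) < 2
  · have : lst.length < 2 := by exact_mod_cast hl
    simp [hl, this]
  · have h2 : 2 ≤ lst.length := by omega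
    have hlt : ¬ lst.length < 2 := by omega
    simp only [hl, hlt, if_false]
    have hcast : (lst.length : Int) - 1 = ((lst.length - 1 : Nat) : Int) := by
      push_cast [Nat.cast_sub (by omega : 1 ≤ lst.length)]; ring
    rw [hcast, PySem.List.pyRange_zero_natCast, PySem.List.foldl_append_singleton_eq_map,
        List.nil_append, map_range_int, asRuns_eq_badPairs]
    have hlen2 : ((pairs lst).length : Int) = ((lst.length - 1 : Nat) : Int) := by
      rw [length_pairs]
    by_cases hn : PySem.Int.mod num 2 == 0
    · simp only [hn, if_true, PySem.List.count_eq, hlen2, count_pairs_odd]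
    · simp only [hn, if_false, PySem.List.count_eq, hlen2, count_pairs_even,
        Bool.false_eq_true]

-- ===== VERDICT (by name: the statement is the Claim_ definition above) =====
theorem available_spots_spec : Claim_equal_available_spots := by
  intro lst num _
  unfold Spec_available_spots
  exact available_spots_eq lst num
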